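-- pv_equiv track=rewrite | github.com/mtndewfan123/ps1-spu-tools | spurm-extractor.py | detectsampend
-- ===== SOURCE A (Python) =====
-- def detectsampend(d,s=0):
--     bad = 0
--     blm = 8
--     for i in range(s,len(d),16):
--         b = d[i:i+16]
--         if len(b) < 16:
--             return i
--
--         h = b[0]
--         shift = h & 0x0F
--         pred  = (h>>4) & 0x0F
--
--         invalid = False
--         if shift > 12 or pred > 4: invalid = True
--         if b[1] & 0xF0: invalid = True
--
--         if invalid:
--             bad += 1
--             if bad >= blm: return i
--         else: bad = 0
--     return len(d)
-- ===== SOURCE B (Python) =====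
-- def detectsampend(d, s=0):
--     blm = 8
--     flags = []
--     trunc = None
--     for i in range(s, len(d), 16):
--         b = d[i:i+16]
--         if len(b) < 16:
--             trunc = i
--             break
--         h = b[0]
--         inv = (h & 0x0F) > 12 or ((h >> 4) & 0x0F) > 4 or (b[1] & 0xF0) != 0
--         flags.append((i, inv))
--     for p in range(len(flags)):
--         w = flags[p:p+blm]
--         if len(w) == blm and all(f for _, f in w):
--             return w[-1][0]
--     return trunc if trunc is not None else len(d)
-- ===== Notes on version B (the rewrite author's own statement) =====
-- stated objective: alternative
-- what changed: Replaces A's single scan with a running consecutive-bad counter by a two-pass decomposition: first collect per-block (index, invalid) flags up to the first truncated block, then window-scan the flag list for the first 8 consecutive invalid flags and return that window's last block index.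
import Mathlib
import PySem

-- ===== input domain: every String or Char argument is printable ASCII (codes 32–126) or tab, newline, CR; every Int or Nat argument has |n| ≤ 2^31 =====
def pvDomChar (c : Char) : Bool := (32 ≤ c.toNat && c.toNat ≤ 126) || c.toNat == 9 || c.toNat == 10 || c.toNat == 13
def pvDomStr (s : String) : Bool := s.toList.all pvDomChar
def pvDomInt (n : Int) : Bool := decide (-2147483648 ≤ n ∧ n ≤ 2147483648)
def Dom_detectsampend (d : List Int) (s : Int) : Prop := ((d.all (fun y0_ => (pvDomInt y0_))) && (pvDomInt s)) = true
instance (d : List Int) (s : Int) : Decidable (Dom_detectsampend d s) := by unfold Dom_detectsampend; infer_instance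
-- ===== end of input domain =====

-- B re-decomposes A's single streak-counting scan into two passes: collect (index, invalid) flags
-- until truncation, then window-scan for the first 8-wide all-invalid window (objective: alternative).


-- ===== PORT A =====
-- loop over range(s, len(d), 16) carrying the consecutive-bad counter; b[0]/b[1] are
-- accessed via pyGetD with default 0, reached only under the guard 16 ≤ b.length, so exact.
def detectsampendGo (d : List Int) : List Int → Int → Int
  | [], _ => (d.length : Int)
  | i :: rest, bad =>
    let b := PySem.List.slice d (some i) (some (i + 16))
    if b.length < 16 then i
    else
      let h := PySem.List.pyGetD b 0 0
      let shift := PySem.Int.band h 15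
      let pred := PySem.Int.band (h >>> 4) 15
      let invalid := decide (shift > 12) || decide (pred > 4) ||
        decide (PySem.Int.band (PySem.List.pyGetD b 1 0) 240 ≠ 0)
      if invalid then
        if bad + 1 ≥ 8 then i else detectsampendGo d rest (bad + 1)
      else detectsampendGo d rest 0

def detectsampend (d : List Int) (s : Int) : Int :=
  detectsampendGo d (PySem.List.pyRange s d.length 16) 0

-- ===== PORT B =====
-- first pass: collect (block index, invalid) flags, stopping at a truncated block
def altCollect (d : List Int) : List Int → List (Int × Bool) × Option Int
  | [] => ([], none)
  | i :: rest =>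
    let b := PySem.List.slice d (some i) (some (i + 16))
    if b.length < 16 then ([], some i)
    else
      let h := PySem.List.pyGetD b 0 0
      let inv := decide (PySem.Int.band h 15 > 12) || decide (PySem.Int.band (h >>> 4) 15 > 4) ||
        decide (PySem.Int.band (PySem.List.pyGetD b 1 0) 240 ≠ 0)
      let (fs, t) := altCollect d rest
      ((i, inv) :: fs, t)

-- second pass: first window of 8 consecutive invalid flags; returns w[-1][0]
def altScan : List (Int × Bool) → Option Int
  | [] => none
  | x :: rest =>
    let w := (x :: rest).take 8
    if w.length == 8 && w.all (fun p => p.2) then (PySem.List.pyGet? w (-1)).map Prod.fst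
    else altScan rest

def detectsampend_alt (d : List Int) (s : Int) : Int :=
  let (fs, t) := altCollect d (PySem.List.pyRange s d.length 16)
  match altScan fs with
  | some r => r
  | none => t.getD (d.length : Int)

-- ===== PRECONDITION & SPEC =====
def Spec_detectsampend (d : List Int) (s : Int) (out : Int) : Prop := out = detectsampend_alt d s
instance (d : List Int) (s : Int) (out : Int) : Decidable (Spec_detectsampend d s out) := by unfold Spec_detectsampend; infer_instance

-- ===== CLAIM (what is proved, stated in full; the proofs are below) =====
def Claim_equal_detectsampend : Prop := ∀ (d : List Int) (s : Int), Dom_detectsampend d s → Spec_detectsampend d s (detectsampend d s)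

-- ===== LEMMAS AND PROOFS =====

-- proof-side helper: A's streak counter run directly over the collected flags
def cntScanP : Int → List (Int × Bool) → Option Int
  | _, [] => none
  | bad, (i, f) :: rest =>
    if f then (if bad + 1 ≥ 8 then some i else cntScanP (bad + 1) rest)
    else cntScanP 0 rest

-- A's loop equals: collect flags, run the counter over them, fall back to trunc/len
lemma go_eq_collect (d : List Int) : ∀ (is : List Int) (bad : Int),
    detectsampendGo d is bad =
      ((cntScanP bad (altCollect d is).1).getD ((altCollect d is).2.getD (d.length : Int))) := by
  intro is
  induction is with
  | nil => intro bad; simp [detectsampendGo, altCollect, cntScanP]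
  | cons i rest ih =>
    intro bad
    simp only [detectsampendGo, altCollect]
    by_cases h1 : (PySem.List.slice d (some i) (some (i + 16))).length < 16
    · simp [h1, cntScanP]
    · rw [if_neg h1, if_neg h1]
      dsimp only
      rw [cntScanP]
      split_ifs with h2 h3
      · simp
      · exact ih (bad + 1)
      · exact ih 0

lemma altScan_head (fs : List (Int × Bool)) (h8 : 8 ≤ fs.length)
    (hall : (fs.take 8).all (fun p => p.2) = true) :
    altScan fs = (fs[7]?).map Prod.fst := by
  cases fs with
  | nil => simp at h8
  | cons x rest =>
    have hlen : ((x :: rest).take 8).length = 8 := by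
      simp only [List.length_take, List.length_cons]
      simp only [List.length_cons] at h8
      omega
    simp only [altScan]
    have hcond : (((x :: rest).take 8).length == 8 && ((x :: rest).take 8).all (fun p => p.2)) = true := by
      rw [hlen, hall]; rfl
    rw [if_pos hcond]
    rw [PySem.List.pyGet?_neg_one, List.getLast?_eq_getElem?, hlen]
    norm_num

lemma cnt_eq_window (fs : List (Int × Bool)) : ∀ (j : Nat), 1 ≤ j → j ≤ 8 →
    cntScanP (8 - (j : Int)) fs =
      if j ≤ fs.length ∧ (fs.take j).all (fun p => p.2) = true
      then (fs[j - 1]?).map Prod.fst else altScan fs := by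
  induction fs with
  | nil =>
    intro j hj1 _
    rw [cntScanP, altScan, if_neg (by rintro ⟨h, -⟩; simp at h; omega)]
  | cons x rest ih =>
    intro j hj1 hj8
    obtain ⟨i, f⟩ := x
    have htake : ((i, f) :: rest).take j = (i, f) :: rest.take (j - 1) := by
      rw [show j = (j - 1) + 1 from by omega, List.take_succ_cons]
      simp
    rw [cntScanP]
    by_cases hf : f = true
    · subst hf
      rw [if_pos rfl]
      by_cases hj : j = 1
      · subst hj
        rw [if_pos (show (8:Int) - (1:Nat) + 1 ≥ 8 from by norm_num)]
        rw [if_pos ⟨by simp, by simp⟩]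
        simp
      · rw [if_neg (show ¬((8:Int) - (j:Nat) + 1 ≥ 8) from by omega)]
        rw [show (8:Int) - (j:Nat) + 1 = 8 - ((j - 1 : Nat) : Int) from by omega]
        rw [ih (j - 1) (by omega) (by omega)]
        have hCiff : (j ≤ ((i, true) :: rest).length ∧ ((((i, true) :: rest).take j).all (fun p => p.2)) = true)
            ↔ (j - 1 ≤ rest.length ∧ ((rest.take (j - 1)).all (fun p => p.2)) = true) := by
          rw [htake]
          simp only [List.length_cons, List.all_cons]
          constructor
          · rintro ⟨ha, hb⟩; simp at hb; exact ⟨by omega, by simpa using hb⟩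
          · rintro ⟨ha, hb⟩; exact ⟨by omega, by simp [hb]⟩
        by_cases hC : (j - 1 ≤ rest.length ∧ ((rest.take (j - 1)).all (fun p => p.2)) = true)
        · rw [if_pos hC, if_pos (hCiff.mpr hC)]
          rw [show j - 1 = (j - 2) + 1 from by omega, List.getElem?_cons_succ]
          simp
        · rw [if_neg hC, if_neg (fun h => hC (hCiff.mp h))]
          -- head 8-window cannot fire either, else hC would hold
          conv_rhs => rw [altScan]
          rw [if_neg ?w8]
          case w8 =>
            intro hcond
            simp only [Bool.and_eq_true, beq_iff_eq] at hcond
            obtain ⟨hl, ha⟩ := hcond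
            have h7 : 7 ≤ rest.length := by
              simp only [List.length_take, List.length_cons] at hl; omega
            apply hC
            refine ⟨by omega, ?_⟩
            rw [show (8:Nat) = 7 + 1 from rfl, List.take_succ_cons] at ha
            simp only [List.all_cons, Bool.and_eq_true] at ha
            rw [show rest.take (j - 1) = (rest.take 7).take (j - 1) from by
              rw [List.take_take]; congr 1; omega]
            apply List.all_eq_true.mpr
            intro p hp
            exact List.all_eq_true.mp ha.2 p (List.mem_of_mem_take hp)
    · have hfalse : f = false := by revert hf; cases f <;> simp
      rw [if_neg hf]
      rw [show (0:Int) = 8 - ((8:Nat):Int) from by norm_num, ih 8 (by omega) (by omega)]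
      rw [if_neg (show ¬(j ≤ ((i, f) :: rest).length ∧ ((((i, f) :: rest).take j).all (fun p => p.2)) = true) from by
        rintro ⟨-, hb⟩; rw [htake] at hb; simp [hfalse] at hb)]
      conv_rhs => rw [altScan]
      rw [if_neg (show ¬((((i, f) :: rest).take 8).length == 8 && (((i, f) :: rest).take 8).all (fun p => p.2)) = true from by
        intro hcond
        simp only [Bool.and_eq_true, beq_iff_eq] at hcond
        rw [show (8:Nat) = 7 + 1 from rfl, List.take_succ_cons] at hcond
        simp [hfalse] at hcond)]
      split_ifs with hC8
      · exact (altScan_head rest hC8.1 hC8.2).symm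
      · rfl

lemma cnt_zero (fs : List (Int × Bool)) : cntScanP 0 fs = altScan fs := by
  rw [show (0:Int) = 8 - ((8:Nat):Int) from by norm_num, cnt_eq_window fs 8 (by omega) (by omega)]
  split_ifs with hc
  · exact (altScan_head fs hc.1 hc.2).symm
  · rfl

-- ===== VERDICT (by name: the statement is the Claim_ definition above) =====
theorem detectsampend_spec : Claim_equal_detectsampend := by
  intro d s _
  unfold Spec_detectsampend detectsampend detectsampend_alt
  rw [go_eq_collect, cnt_zero]
  cases h : altScan (altCollect d (PySem.List.pyRange s (↑d.length) 16)).1 <;> simp [h]
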